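-- pv_equiv track=rewrite | github.com/MatsukSket/AOIS | lab2_truth_table/src/minimization.py | rect_to_mask
-- ===== SOURCE A (Python) =====
-- def rect_to_mask(rect_cells: set, num_vars: int) -> str:
--     """Формиует бинарную маску для прямоугольника."""
--     cells_list = list(rect_cells)
--     mask = ""
--
--     for i in range(num_vars):
--         bits_at_i = set(cell[i] for cell in cells_list)
--
--         if len(bits_at_i) == 1:
--             mask += bits_at_i.pop()
--         else:
--             mask += "-"
--
--     return mask
-- ===== SOURCE B (Python) =====
-- def rect_to_mask(rect_cells: set, num_vars: int) -> str:
--     """Формиует бинарную маску для прямоугольника."""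
--     cells = list(rect_cells)
--     if not cells:
--         return "-" * num_vars
--     mask = [cells[0][i] for i in range(num_vars)]
--     for cell in cells[1:]:
--         mask = [m if cell[i] == m else "-" for i, m in enumerate(mask)]
--     return "".join(mask)
-- ===== Notes on version B (the rewrite author's own statement) =====
-- stated objective: simpler
-- what changed: Instead of building a set of column values for every position, B seeds the mask with the first cell and folds the remaining cells over it, dashing each position where a cell disagrees with the accumulated mask; the per-column set construction disappears.
import Mathlib
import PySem

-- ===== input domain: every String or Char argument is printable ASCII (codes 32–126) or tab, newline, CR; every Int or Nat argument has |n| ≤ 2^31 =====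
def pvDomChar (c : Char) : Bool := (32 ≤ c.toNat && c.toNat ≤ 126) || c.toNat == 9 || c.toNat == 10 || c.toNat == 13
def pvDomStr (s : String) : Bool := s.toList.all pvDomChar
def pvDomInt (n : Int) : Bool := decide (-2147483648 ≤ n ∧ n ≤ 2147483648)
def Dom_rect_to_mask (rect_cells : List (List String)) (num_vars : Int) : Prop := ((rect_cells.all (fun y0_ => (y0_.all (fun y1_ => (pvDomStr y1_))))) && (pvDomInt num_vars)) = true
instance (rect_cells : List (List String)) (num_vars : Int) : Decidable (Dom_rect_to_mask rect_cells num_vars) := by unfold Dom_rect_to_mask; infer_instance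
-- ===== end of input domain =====

-- B replaces A's per-column set construction by seeding the mask with the first cell and
-- folding the remaining cells over it, dashing positions that disagree (objective: simpler).


-- ===== PORT A =====
-- Strings are accumulated as List Char; cell[i] is pyGetD, exact under Pre_ (in range there).
def rect_to_mask (rect_cells : List (List String)) (num_vars : Int) : String :=
  let cells_list := rect_cells
  String.ofList ((PySem.List.pyRange 0 num_vars 1).foldl
    (fun mask i =>
      let bits : PySem.Set String :=
        PySem.Set.ofList (cells_list.map (fun cell => PySem.List.pyGetD cell i ""))
      if bits.length = 1 then mask ++ (bits.headD "").toList else mask ++ ['-']) [])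

-- ===== PORT B =====
def rect_to_mask_alt (rect_cells : List (List String)) (num_vars : Int) : String :=
  match rect_cells with
  | [] => String.ofList (List.replicate num_vars.toNat '-')   -- "-" * num_vars
  | seed :: rest =>
    let mask0 := (PySem.List.pyRange 0 num_vars 1).map (fun i => PySem.List.pyGetD seed i "")
    let mask := rest.foldl
      (fun mask cell =>
        (PySem.List.enumerate mask).map
          (fun p => if PySem.List.pyGetD cell p.1 "" == p.2 then p.2 else "-")) mask0
    PySem.Str.join "" mask

-- ===== PRECONDITION & SPEC =====
-- Pre_ excludes exactly the inputs where Python A raises IndexError: a positive num_vars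
-- with some cell shorter than num_vars.
def Pre_rect_to_mask (rect_cells : List (List String)) (num_vars : Int) : Prop :=
  0 < num_vars → ∀ cell ∈ rect_cells, num_vars ≤ (cell.length : Int)
instance (rect_cells : List (List String)) (num_vars : Int) : Decidable (Pre_rect_to_mask rect_cells num_vars) := by unfold Pre_rect_to_mask; infer_instance

def pvWitness_rect_to_mask : List (List String) × Int := ([["1", "0"], ["1", "1"]], 2)

def Spec_rect_to_mask (rect_cells : List (List String)) (num_vars : Int) (out : String) : Prop := out = rect_to_mask_alt rect_cells num_vars
instance (rect_cells : List (List String)) (num_vars : Int) (out : String) : Decidable (Spec_rect_to_mask rect_cells num_vars out) := by unfold Spec_rect_to_mask; infer_instance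

-- ===== CLAIM (what is proved, stated in full; the proofs are below) =====
def Claim_equal_rect_to_mask : Prop := ∀ (rect_cells : List (List String)) (num_vars : Int), Dom_rect_to_mask rect_cells num_vars → Pre_rect_to_mask rect_cells num_vars → Spec_rect_to_mask rect_cells num_vars (rect_to_mask rect_cells num_vars)

-- ===== LEMMAS AND PROOFS =====

-- set(a :: l) is [a] when every element of l equals a
theorem ofList_cons_of_all {l : List String} {a : String} (h : ∀ x ∈ l, x = a) :
    PySem.Set.ofList (a :: l) = [a] := by
  rw [PySem.Set.ofList_eq_foldl]
  have h0 : List.foldl PySem.Set.add ([] : PySem.Set String) (a :: l)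
      = List.foldl PySem.Set.add [a] l := by
    simp [PySem.Set.add, PySem.Set.contains]
  rw [h0]
  clear h0
  induction l with
  | nil => rfl
  | cons x xs ih =>
    have hx : x = a := h x (by simp)
    subst hx
    have hadd : PySem.Set.add ([x] : PySem.Set String) x = [x] := by
      simp [PySem.Set.add, PySem.Set.contains]
    simp only [List.foldl_cons, hadd]
    exact ih (fun y hy => h y (by simp [hy]))

-- otherwise its length is not 1
theorem ofList_cons_len_ne {l : List String} {a : String} (h : ¬ ∀ x ∈ l, x = a) :
    (PySem.Set.ofList (a :: l)).length ≠ 1 := by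
  push Not at h
  obtain ⟨x, hx, hne⟩ := h
  intro hlen
  obtain ⟨y, hy⟩ := List.length_eq_one_iff.mp hlen
  have ha : a ∈ PySem.Set.ofList (a :: l) := (PySem.Set.mem_ofList _ _).mpr (by simp)
  have hxm : x ∈ PySem.Set.ofList (a :: l) := (PySem.Set.mem_ofList _ _).mpr (by simp [hx])
  rw [hy] at ha hxm
  simp at ha hxm
  exact hne (hxm.trans ha.symm)

-- mapping a position-indexed function over an enumerated range-image
theorem enumerate_map_pyRange_aux (g : Int → String) (F : Int → String → String) :
    ∀ (k : Nat) (a : Int),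
      (PySem.List.enumerate ((PySem.List.pyRange a (a + k) 1).map g) a).map (fun p => F p.1 p.2)
        = (PySem.List.pyRange a (a + k) 1).map (fun i => F i (g i)) := by
  intro k
  induction k with
  | zero => intro a; simp [PySem.List.enumerate_nil]
  | succ m ih =>
    intro a
    rw [PySem.List.pyRange_one_cons (by omega : a < a + (m + 1 : Nat))]
    have harg : a + 1 + (m : Int) = a + ((m + 1 : Nat) : Int) := by push_cast; ring
    simp only [List.map_cons, PySem.List.enumerate_cons]
    have := ih (a + 1)
    rw [harg] at this
    rw [this]

theorem enumerate_map_pyRange (g : Int → String) (F : Int → String → String) (b : Int) :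
    (PySem.List.enumerate ((PySem.List.pyRange 0 b 1).map g) 0).map (fun p => F p.1 p.2)
      = (PySem.List.pyRange 0 b 1).map (fun i => F i (g i)) := by
  by_cases hb : b ≤ 0
  · simp [PySem.List.pyRange_one_eq_nil hb, PySem.List.enumerate_nil]
  · have : (0 : Int) + (b.toNat : Int) = b := by omega
    have h := enumerate_map_pyRange_aux g F b.toNat 0
    rwa [this] at h

-- characterisation of B's fold over the remaining cells
theorem bfold_eq (rest : List (List String)) (n : Int) (g : Int → String) :
    rest.foldl
      (fun mask cell =>
        (PySem.List.enumerate mask).map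
          (fun p => if PySem.List.pyGetD cell p.1 "" == p.2 then p.2 else "-"))
      ((PySem.List.pyRange 0 n 1).map g)
    = (PySem.List.pyRange 0 n 1).map
        (fun i => if rest.all (fun cell => PySem.List.pyGetD cell i "" == g i) then g i else "-") := by
  induction rest generalizing g with
  | nil => simp
  | cons cell rest ih =>
    simp only [List.foldl_cons]
    rw [show (PySem.List.enumerate ((PySem.List.pyRange 0 n 1).map g) 0).map
          (fun p => if PySem.List.pyGetD cell p.1 "" == p.2 then p.2 else "-")
        = (PySem.List.pyRange 0 n 1).map
          (fun i => if PySem.List.pyGetD cell i "" == g i then g i else "-") from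
      enumerate_map_pyRange g (fun i m => if PySem.List.pyGetD cell i "" == m then m else "-") n]
    rw [ih]
    apply List.map_congr_left
    intro i _
    by_cases hc : PySem.List.pyGetD cell i "" == g i
    · simp [hc]
    · simp [hc]

-- "".join on char lists is flatten
theorem join_empty_flatten (parts : List (List Char)) :
    PySem.Chars.join [] parts = parts.flatten := by
  induction parts with
  | nil => simp [PySem.Chars.join_nil]
  | cons p ps ih =>
    cases ps with
    | nil => simp [PySem.Chars.join_singleton]
    | cons q qs => rw [PySem.Chars.join_cons_cons] at *; simp_all

theorem flatMap_const_dash (l : List Int) :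
    l.flatMap (fun _ => (['-'] : List Char)) = List.replicate l.length '-' := by
  induction l with
  | nil => rfl
  | cons x xs ih => simp [List.flatMap_cons, ih, List.replicate_succ]

-- the A-side loop body, written as a single append
theorem afold_append (cells : List (List String)) (n : Int) :
    (PySem.List.pyRange 0 n 1).foldl
      (fun mask i =>
        let bits : PySem.Set String :=
          PySem.Set.ofList (cells.map (fun cell => PySem.List.pyGetD cell i ""))
        if bits.length = 1 then mask ++ (bits.headD "").toList else mask ++ ['-']) []
    = (PySem.List.pyRange 0 n 1).flatMap
        (fun i =>
          let bits : PySem.Set String :=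
            PySem.Set.ofList (cells.map (fun cell => PySem.List.pyGetD cell i ""))
          if bits.length = 1 then (bits.headD "").toList else ['-']) := by
  have hfun : (fun (mask : List Char) (i : Int) =>
        let bits : PySem.Set String :=
          PySem.Set.ofList (cells.map (fun cell => PySem.List.pyGetD cell i ""))
        if bits.length = 1 then mask ++ (bits.headD "").toList else mask ++ ['-'])
      = (fun (mask : List Char) (i : Int) =>
        mask ++
          (let bits : PySem.Set String :=
            PySem.Set.ofList (cells.map (fun cell => PySem.List.pyGetD cell i ""))
           if bits.length = 1 then (bits.headD "").toList else ['-'])) := by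
    funext m i; simp only []; split <;> rfl
  rw [hfun, PySem.List.foldl_append_eq_flatMap]
  rfl

-- ===== VERDICT (by name: the statement is the Claim_ definition above) =====
theorem rect_to_mask_spec : Claim_equal_rect_to_mask := by
  intro rect_cells num_vars _ _
  unfold Spec_rect_to_mask
  apply String.toList_inj.mp
  cases rect_cells with
  | nil =>
    simp only [rect_to_mask, rect_to_mask_alt, String.toList_ofList]
    rw [afold_append]
    simp only [List.map_nil]
    have : (fun (i : Int) =>
        let bits : PySem.Set String := PySem.Set.ofList ([] : List String)
        if bits.length = 1 then (bits.headD "").toList else ['-'])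
        = (fun (_ : Int) => (['-'] : List Char)) := by
      funext i; rfl
    rw [this, flatMap_const_dash, PySem.List.length_pyRange_one]
    congr 1
    omega
  | cons seed rest =>
    simp only [rect_to_mask, rect_to_mask_alt, String.toList_ofList]
    rw [afold_append, bfold_eq, PySem.Str.toList_join]
    have hsep : ("" : String).toList = ([] : List Char) := rfl
    rw [hsep, join_empty_flatten, List.map_map, ← List.flatMap_def]
    rw [List.flatMap_def, List.flatMap_def]
    apply congrArg List.flatten
    apply List.map_congr_left
    intro i _
    simp only [List.map_cons, Function.comp]
    by_cases hall : rest.all (fun cell => PySem.List.pyGetD cell i "" == PySem.List.pyGetD seed i "")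
    · have hAll : ∀ x ∈ rest.map (fun c => PySem.List.pyGetD c i ""), x = PySem.List.pyGetD seed i "" := by
        intro x hx
        obtain ⟨c, hc, rfl⟩ := List.mem_map.mp hx
        exact eq_of_beq (List.all_eq_true.mp hall c hc)
      rw [ofList_cons_of_all hAll]
      simp [hall]
    · have h2 : ¬ ∀ x ∈ rest.map (fun c => PySem.List.pyGetD c i ""), x = PySem.List.pyGetD seed i "" := by
        intro hco
        apply hall
        rw [List.all_eq_true]
        intro c hc
        exact beq_iff_eq.mpr (hco _ (List.mem_map.mpr ⟨c, hc, rfl⟩))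
      have := ofList_cons_len_ne h2
      simp only [this, hall, if_false, Bool.false_eq_true]
      decide
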